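-- pv_equiv track=rewrite | github.com/Magnificent-Edric/Deep-Learning | first_seminar/cumsum_and_erase.py | cumsum_and_erase
-- ===== SOURCE A (Python) =====
-- def cumsum_and_erase(A, erase = 1):
--     B = []
--     i = 0
--     lenght = len(A)
--     while i < lenght:
--         j = 0
--         variable = 0
--         while j <= i:
--             variable += A[j]
--             j += 1
--         if variable != erase:
--             B.append(variable)
--         i += 1
--     return B
-- ===== SOURCE B (Python) =====
-- def cumsum_and_erase(A, erase = 1):
--     B = []
--     s = 0
--     for a in A:
--         s += a
--         if s != erase:
--             B.append(s)
--     return B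
-- ===== Notes on version B (the rewrite author's own statement) =====
-- stated objective: faster
-- what changed: B keeps one running cumulative sum in a single pass over A instead of recomputing each prefix sum with an inner loop.
import Mathlib
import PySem

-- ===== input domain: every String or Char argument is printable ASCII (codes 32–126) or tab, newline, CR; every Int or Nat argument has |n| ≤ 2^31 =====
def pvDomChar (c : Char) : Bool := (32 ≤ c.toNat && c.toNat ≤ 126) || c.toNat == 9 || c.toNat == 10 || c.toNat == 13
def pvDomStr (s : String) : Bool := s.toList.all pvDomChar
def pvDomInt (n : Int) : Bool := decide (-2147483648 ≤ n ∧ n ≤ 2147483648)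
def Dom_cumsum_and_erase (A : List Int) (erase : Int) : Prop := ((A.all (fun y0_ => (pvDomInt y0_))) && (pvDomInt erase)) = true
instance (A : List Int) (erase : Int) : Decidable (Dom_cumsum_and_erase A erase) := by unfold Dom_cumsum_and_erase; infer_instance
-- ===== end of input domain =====

-- B replaces A's nested loops (each prefix sum recomputed from scratch) with one
-- running cumulative sum in a single pass; objective: faster (asymptotic).

-- ===== PORT A =====
-- outer while over i < len(A); inner while over j ≤ i summing A[j] (indices always in range)
def cumsum_and_erase (A : List Int) (erase : Int) : List Int :=
  (List.range A.length).foldl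
    (fun B i =>
      let v := (List.range (i + 1)).foldl (fun v j => v + A.getD j 0) 0
      if v ≠ erase then B ++ [v] else B)
    []

-- ===== PORT B =====
-- single pass: state (running sum, output list)
def cumsum_and_erase_alt (A : List Int) (erase : Int) : List Int :=
  (A.foldl
    (fun sB a =>
      let s := sB.1 + a
      (s, if s ≠ erase then sB.2 ++ [s] else sB.2))
    ((0 : Int), ([] : List Int))).2

-- ===== PRECONDITION & SPEC =====
def Spec_cumsum_and_erase (A : List Int) (erase : Int) (out : List Int) : Prop := out = cumsum_and_erase_alt A erase
instance (A : List Int) (erase : Int) (out : List Int) : Decidable (Spec_cumsum_and_erase A erase out) := by unfold Spec_cumsum_and_erase; infer_instance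

-- ===== CLAIM (what is proved, stated in full; the proofs are below) =====
def Claim_equal_cumsum_and_erase : Prop := ∀ (A : List Int) (erase : Int), Dom_cumsum_and_erase A erase → Spec_cumsum_and_erase A erase (cumsum_and_erase A erase)

-- ===== LEMMAS AND PROOFS =====

-- A's inner loop computes the (i+1)-prefix sum
lemma pv_take_succ_sum (A : List Int) (n : Nat) :
    (A.take (n + 1)).sum = (A.take n).sum + A.getD n 0 := by
  rw [List.take_add_one, List.sum_append, List.getD_eq_getElem?_getD]
  cases h : A[n]? <;> simp [h]

lemma pv_inner_sum (A : List Int) (i : Nat) :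
    (List.range (i + 1)).foldl (fun v j => v + A.getD j 0) 0 = (A.take (i + 1)).sum := by
  induction i with
  | zero =>
      cases A <;> simp [List.range_succ]
  | succ n ih =>
      rw [List.range_succ, List.foldl_append, ih]
      simp only [List.foldl_cons, List.foldl_nil]
      rw [pv_take_succ_sum A (n + 1)]

lemma pv_foldl_congr_mem {α β : Type} (l : List α) (f g : β → α → β)
    (h : ∀ b a, a ∈ l → f b a = g b a) : ∀ b, l.foldl f b = l.foldl g b := by
  induction l with
  | nil => intro b; rfl
  | cons x xs ih =>
      intro b
      simp only [List.foldl_cons]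
      rw [h b x (by simp)]
      exact ih (fun b a ha => h b a (List.mem_cons_of_mem _ ha)) _

-- A's port in prefix-sum form
lemma pv_portA_ref (A : List Int) (erase : Int) :
    cumsum_and_erase A erase =
      (List.range A.length).foldl
        (fun B i => if (A.take (i + 1)).sum ≠ erase then B ++ [(A.take (i + 1)).sum] else B) [] := by
  unfold cumsum_and_erase
  exact pv_foldl_congr_mem _ _ _ (fun b i _ => by simp only [pv_inner_sum]) []

lemma pv_alt_fst (A : List Int) (erase : Int) : ∀ (s : Int) (B : List Int),
    (A.foldl (fun sB a => let s := sB.1 + a; (s, if s ≠ erase then sB.2 ++ [s] else sB.2)) (s, B)).1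
      = s + A.sum := by
  induction A with
  | nil => intro s B; simp
  | cons x xs ih => intro s B; simp only [List.foldl_cons]; rw [ih, List.sum_cons]; ring

lemma pv_main (A : List Int) (erase : Int) :
    cumsum_and_erase A erase = cumsum_and_erase_alt A erase := by
  induction A using List.reverseRecOn with
  | nil => simp [cumsum_and_erase, cumsum_and_erase_alt]
  | append_singleton A x ih =>
      rw [pv_portA_ref]
      have hlen : (A ++ [x]).length = A.length + 1 := by simp
      rw [hlen, List.range_succ, List.foldl_append]
      have hstep : ∀ i, i ∈ List.range A.length → (A ++ [x]).take (i + 1) = A.take (i + 1) := by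
        intro i hi
        rw [List.mem_range] at hi
        exact List.take_append_of_le_length (by omega)
      have h1 : (List.range A.length).foldl
          (fun B i => if ((A ++ [x]).take (i + 1)).sum ≠ erase then B ++ [((A ++ [x]).take (i + 1)).sum] else B) []
          = cumsum_and_erase A erase := by
        rw [pv_portA_ref]
        exact pv_foldl_congr_mem _ _ _ (fun b i hi => by rw [hstep i hi]) []
      rw [h1, ih]
      have htail : (A ++ [x]).take (A.length + 1) = A ++ [x] :=
        List.take_of_length_le (by simp)
      simp only [List.foldl_cons, List.foldl_nil, htail, List.sum_append, List.sum_cons,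
        List.sum_nil]
      unfold cumsum_and_erase_alt
      rw [List.foldl_append]
      simp only [List.foldl_cons, List.foldl_nil]
      rw [pv_alt_fst A erase 0 []]
      simp only [zero_add]
      split_ifs <;> simp_all [add_zero]

-- ===== VERDICT (by name: the statement is the Claim_ definition above) =====
theorem cumsum_and_erase_spec : Claim_equal_cumsum_and_erase := by
  intro A erase _
  exact pv_main A erase
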